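-- pv_equiv track=rewrite | github.com/aqeeeeel/IS-project | IS-project-main/src/puf/arbiter.py | _transform
-- ===== SOURCE A (Python) =====
-- from typing import Sequence
--
-- def _transform(challenge: Sequence[int]) -> list[int]:
--     phi: list[int] = []
--     product = 1
--     for bit in reversed(challenge):
--         product *= 1 if bit == 1 else -1
--         phi.append(product)
--     phi.reverse()
--     phi.append(1)
--     return phi
-- ===== SOURCE B (Python) =====
-- from typing import Sequence
--
-- def _transform(challenge: Sequence[int]) -> list[int]:
--     # total-product identity: suffix[i] = total * prefix[i] since each sign squares to 1
--     signs = [1 if bit == 1 else -1 for bit in challenge]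
--     total = 1
--     for s in signs:
--         total *= s
--     phi = []
--     prefix = 1
--     for s in signs:
--         phi.append(total * prefix)
--         prefix *= s
--     phi.append(total * prefix)
--     return phi
-- ===== Notes on version B (the rewrite author's own statement) =====
-- stated objective: alternative
-- what changed: Replaces the reverse-traversal suffix accumulation with two forward passes using the identity suffix[i] = total * prefix[i] for +/-1 signs (prefix squared is 1): one pass for the total product, one for running prefix products.
import Mathlib
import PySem

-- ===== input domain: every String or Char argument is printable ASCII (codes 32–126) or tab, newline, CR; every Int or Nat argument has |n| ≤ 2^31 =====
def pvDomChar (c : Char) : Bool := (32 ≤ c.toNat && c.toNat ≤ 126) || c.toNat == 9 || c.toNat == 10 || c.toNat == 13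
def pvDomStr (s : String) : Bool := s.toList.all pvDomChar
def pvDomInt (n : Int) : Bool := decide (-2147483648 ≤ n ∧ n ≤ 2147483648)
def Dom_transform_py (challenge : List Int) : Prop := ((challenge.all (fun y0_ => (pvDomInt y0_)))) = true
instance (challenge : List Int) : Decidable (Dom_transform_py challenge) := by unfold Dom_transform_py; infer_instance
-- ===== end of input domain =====

-- B replaces the reverse-traversal suffix accumulation with two forward passes using
-- the identity suffix[i] = total * prefix[i] for ±1 signs (objective: alternative).


-- ===== PORT A =====
-- literal port of A: fold over reversed challenge accumulating (product, phi), then reverse and append 1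
def transform_py (challenge : List Int) : List Int :=
  let st := challenge.reverse.foldl
    (fun (st : Int × List Int) bit =>
      let product := st.1 * (if bit = 1 then 1 else -1)
      (product, st.2 ++ [product]))
    (1, [])
  st.2.reverse ++ [1]

-- ===== PORT B =====
-- literal port of Source B: map to signs, fold for total, forward fold emitting total*prefix
def transform_py_alt (challenge : List Int) : List Int :=
  let signs := challenge.map (fun bit => if bit = 1 then (1 : Int) else -1)
  let total := signs.foldl (fun t s => t * s) 1
  let st := signs.foldl
    (fun (st : Int × List Int) s => (st.1 * s, st.2 ++ [total * st.1]))
    (1, [])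
  st.2 ++ [total * st.1]

-- ===== PRECONDITION & SPEC =====
def Spec_transform_py (challenge : List Int) (out : List Int) : Prop := out = transform_py_alt challenge
instance (challenge : List Int) (out : List Int) : Decidable (Spec_transform_py challenge out) := by unfold Spec_transform_py; infer_instance

-- ===== CLAIM (what is proved, stated in full; the proofs are below) =====
def Claim_equal_transform_py : Prop := ∀ (challenge : List Int), Dom_transform_py challenge → Spec_transform_py challenge (transform_py challenge)

-- ===== LEMMAS AND PROOFS =====

-- sign of a bit
def pvSgn (b : Int) : Int := if b = 1 then 1 else -1

-- product of signs of a challenge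
def pvProd (c : List Int) : Int := ((c.map pvSgn)).prod

-- the common reference value: suffix sign-products, one per position, then 1
def pvSuf : List Int → List Int
  | [] => []
  | b :: t => (pvSgn b * pvProd t) :: pvSuf t

theorem pvSgn_sq (b : Int) : pvSgn b * pvSgn b = 1 := by
  unfold pvSgn; split_ifs <;> norm_num

theorem pvProd_sq (c : List Int) : pvProd c * pvProd c = 1 := by
  induction c with
  | nil => simp [pvProd]
  | cons b t ih =>
    have : pvProd (b :: t) = pvSgn b * pvProd t := by simp [pvProd]
    rw [this]
    calc pvSgn b * pvProd t * (pvSgn b * pvProd t)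
        = (pvSgn b * pvSgn b) * (pvProd t * pvProd t) := by ring
      _ = 1 := by rw [pvSgn_sq, ih]; ring

-- A's loop output list (running prefix products of signs), as a recursion
def pvK (p : Int) : List Int → List Int
  | [] => []
  | b :: t => (p * pvSgn b) :: pvK (p * pvSgn b) t

theorem loopA_eq (rs : List Int) : ∀ (p : Int) (acc : List Int),
    rs.foldl (fun (st : Int × List Int) bit =>
        let product := st.1 * (if bit = 1 then 1 else -1)
        (product, st.2 ++ [product])) (p, acc)
      = (p * pvProd rs, acc ++ pvK p rs) := by
  induction rs with
  | nil => intro p acc; simp [pvProd, pvK]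
  | cons b t ih =>
    intro p acc
    simp only [List.foldl_cons]
    rw [ih]
    have hs : (if b = 1 then (1 : Int) else -1) = pvSgn b := rfl
    simp [hs, pvProd, pvK, mul_assoc, List.append_assoc]

theorem pvK_append (xs : List Int) : ∀ (p : Int) (ys : List Int),
    pvK p (xs ++ ys) = pvK p xs ++ pvK (p * pvProd xs) ys := by
  induction xs with
  | nil => intro p ys; simp [pvK, pvProd]
  | cons b t ih =>
    intro p ys
    simp only [List.cons_append, pvK, ih]
    have : pvProd (b :: t) = pvSgn b * pvProd t := by simp [pvProd]
    rw [this]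
    ring_nf

theorem prod_reverse_eq (c : List Int) : pvProd c.reverse = pvProd c := by
  simp [pvProd, List.map_reverse]

-- A's result characterization: A = pvSuf c ++ [1]
theorem A_char (c : List Int) : transform_py c = pvSuf c ++ [1] := by
  unfold transform_py
  simp only [loopA_eq, List.nil_append]
  congr 1
  induction c with
  | nil => simp [pvK, pvSuf]
  | cons b t ih =>
    have h1 : (b :: t).reverse = t.reverse ++ [b] := by simp
    rw [h1, pvK_append, prod_reverse_eq]
    simp only [pvK, List.reverse_append, List.reverse_cons, List.reverse_nil,
      List.nil_append, List.cons_append, ih]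
    simp [pvSuf, mul_comm]

-- B's loop prefix list
def pvPre (p : Int) : List Int → List Int
  | [] => []
  | x :: t => p :: pvPre (p * x) t

theorem loopB_eq (s : List Int) : ∀ (T p : Int) (acc : List Int),
    s.foldl (fun (st : Int × List Int) x => (st.1 * x, st.2 ++ [T * st.1])) (p, acc)
      = (p * s.prod, acc ++ (pvPre p s).map (fun x => T * x)) := by
  induction s with
  | nil => intro T p acc; simp [pvPre]
  | cons x t ih =>
    intro T p acc
    simp only [List.foldl_cons]
    rw [ih]
    simp [pvPre, mul_assoc, List.append_assoc, List.prod_cons]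

theorem foldl_mul_eq_prod (s : List Int) : s.foldl (fun t x => t * x) 1 = s.prod := by
  simpa using (List.prod_eq_foldl (l := s)).symm

theorem pvPre_scale (s : List Int) : ∀ p, pvPre p s = (pvPre 1 s).map (fun x => p * x) := by
  induction s with
  | nil => intro p; simp [pvPre]
  | cons x t ih =>
    intro p
    simp only [pvPre, ih (p * x), ih (1 * x), List.map_map, List.map_cons]
    congr 1
    · ring
    · apply List.map_congr_left; intro y _; simp only [Function.comp_apply]; ring

-- key identity: total * prefix = suffix, elementwise
theorem B_pre_char (c : List Int) :
    (pvPre 1 (c.map pvSgn)).map (fun x => pvProd c * x) = pvSuf c := by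
  induction c with
  | nil => simp [pvPre, pvSuf]
  | cons b t ih =>
    have hT : pvProd (b :: t) = pvSgn b * pvProd t := by simp [pvProd]
    simp only [List.map_cons, pvPre, pvSuf]
    rw [pvPre_scale]
    simp only [List.map_map]
    congr 1
    · rw [hT]; ring
    · rw [← ih]
      apply List.map_congr_left
      intro x _
      simp only [Function.comp_apply, hT]
      calc pvSgn b * pvProd t * (1 * pvSgn b * x)
          = pvSgn b * pvSgn b * (pvProd t * x) := by ring
        _ = pvProd t * x := by rw [pvSgn_sq]; ring

theorem B_char (c : List Int) : transform_py_alt c = pvSuf c ++ [1] := by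
  unfold transform_py_alt
  simp only [foldl_mul_eq_prod, loopB_eq, List.nil_append]
  have hp : ((c.map pvSgn)).prod = pvProd c := rfl
  have hmap : (c.map fun bit => if bit = 1 then (1 : Int) else -1) = c.map pvSgn := rfl
  rw [hmap, hp, B_pre_char]
  congr 1
  simp only [one_mul]
  rw [pvProd_sq]

-- ===== VERDICT (by name: the statement is the Claim_ definition above) =====
theorem transform_py_spec : Claim_equal_transform_py := by
  intro c _
  unfold Spec_transform_py
  rw [A_char, B_char]
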